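-- pv_equiv track=rewrite | github.com/MY-Raza/TradeX_Backend | app/db/session.py | _make_async_url
-- ===== SOURCE A (Python) =====
-- def _make_async_url(url: str) -> str:
--     """
--     Normalise any PostgreSQL URL variant to postgresql+asyncpg://.
--     Handles:
--       postgresql://...       (standard)
--       postgres://...         (Heroku / Render / some Railway configs)
--       postgresql+psycopg2:// (sync driver explicit)
--       postgresql+asyncpg://  (already correct – pass through)
--     """
--     replacements = [
--         ("postgresql+psycopg2://", "postgresql+asyncpg://"),
--         ("postgresql+psycopg://",  "postgresql+asyncpg://"),
--         ("postgresql://",          "postgresql+asyncpg://"),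
--         ("postgres://",            "postgresql+asyncpg://"),
--     ]
--     for old, new in replacements:
--         if url.startswith(old):
--             return url.replace(old, new, 1)
--     return url  # already correct or unknown scheme – let SQLAlchemy raise
-- ===== SOURCE B (Python) =====
-- def _make_async_url(url: str) -> str:
--     head, sep, tail = url.partition("://")
--     if sep and head in {"postgresql+psycopg2", "postgresql+psycopg", "postgresql", "postgres"}:
--         return "postgresql+asyncpg://" + tail
--     return url
-- ===== Notes on version B (the rewrite author's own statement) =====
-- stated objective: idiomatic
-- what changed: Replaces the sequential startswith/replace loop over (old,new) pairs by a single partition of the URL at the scheme separator plus one set-membership test of the scheme head.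
import Mathlib
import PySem

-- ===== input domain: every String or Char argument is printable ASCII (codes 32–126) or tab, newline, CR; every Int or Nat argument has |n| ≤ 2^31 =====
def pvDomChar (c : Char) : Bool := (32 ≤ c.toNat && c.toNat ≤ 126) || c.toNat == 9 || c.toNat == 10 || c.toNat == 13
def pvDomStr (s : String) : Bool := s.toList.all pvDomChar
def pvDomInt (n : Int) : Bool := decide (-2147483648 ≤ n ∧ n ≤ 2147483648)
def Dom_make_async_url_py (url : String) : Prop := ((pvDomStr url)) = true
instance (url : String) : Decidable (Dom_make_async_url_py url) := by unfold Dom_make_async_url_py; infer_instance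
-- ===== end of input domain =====

-- B replaces A's sequential startswith/replace loop by one partition at '://' plus a
-- set-membership test of the scheme head (idiomatic; same return value everywhere).

-- ===== PORT A =====
-- s.replace(old, new, 1): replace the first occurrence only (exact, incl. old = "").
def pyReplace1 (s old nw : List Char) : List Char :=
  if PySem.Chars.find s old = -1 then s
  else s.take (PySem.Chars.find s old).toNat ++ nw
       ++ s.drop ((PySem.Chars.find s old).toNat + old.length)

def aReplacements : List (List Char × List Char) :=
  [("postgresql+psycopg2://".toList, "postgresql+asyncpg://".toList),
   ("postgresql+psycopg://".toList,  "postgresql+asyncpg://".toList),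
   ("postgresql://".toList,          "postgresql+asyncpg://".toList),
   ("postgres://".toList,            "postgresql+asyncpg://".toList)]

def aLoop (url : String) : List (List Char × List Char) → String
  | [] => url
  | (old, nw) :: rest =>
    if PySem.Chars.startswith url.toList old then String.ofList (pyReplace1 url.toList old nw)
    else aLoop url rest

def make_async_url_py (url : String) : String :=
  aLoop url aReplacements

-- ===== PORT B =====
-- s.partition(sep) for nonempty sep: split at the FIRST occurrence, (s, "", "") if absent (exact).
def pyPartition (s sep : List Char) : List Char × List Char × List Char :=
  if PySem.Chars.find s sep = -1 then (s, [], [])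
  else (s.take (PySem.Chars.find s sep).toNat, sep,
        s.drop ((PySem.Chars.find s sep).toNat + sep.length))

def bKnown : List (List Char) :=
  ["postgresql+psycopg2".toList, "postgresql+psycopg".toList, "postgresql".toList, "postgres".toList]

-- the destructuring 'head, sep, tail = …' plus the guarded return
def bCombine (url : String) : List Char × List Char × List Char → String
  | (head, sep, tail) =>
    if sep ≠ [] ∧ head ∈ bKnown then String.ofList ("postgresql+asyncpg://".toList ++ tail)
    else url

def make_async_url_py_alt (url : String) : String :=
  bCombine url (pyPartition url.toList "://".toList)

-- ===== PRECONDITION & SPEC =====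
def Spec_make_async_url_py (url : String) (out : String) : Prop := out = make_async_url_py_alt url
instance (url : String) (out : String) : Decidable (Spec_make_async_url_py url out) := by unfold Spec_make_async_url_py; infer_instance

-- ===== CLAIM (what is proved, stated in full; the proofs are below) =====
def Claim_equal_make_async_url_py : Prop := ∀ (url : String), Dom_make_async_url_py url → Spec_make_async_url_py url (make_async_url_py url)

-- ===== LEMMAS AND PROOFS =====

-- find points at 0 when sub is a prefix of s
lemma find_zero_of_prefix (s sub : List Char) (h : sub <+: s) : PySem.Chars.find s sub = 0 := by
  have hne : PySem.Chars.find s sub ≠ -1 := by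
    rw [PySem.Chars.find_ne_neg_one_iff]; exact h.isInfix
  have hnn : 0 ≤ PySem.Chars.find s sub := by
    have := PySem.Chars.neg_one_le_find s sub; omega
  obtain ⟨-, hmin⟩ := PySem.Chars.find_spec (s := s) (sub := sub) hnn
  by_contra hne0
  have hpos : 0 < (PySem.Chars.find s sub).toNat := by omega
  exact hmin 0 hpos (by simpa using h)

-- if p contains no ':', the first occurrence of "://" in p ++ "://" ++ rest is at p.length
lemma find_sep_eq (p rest : List Char) (hp : ':' ∉ p) :
    PySem.Chars.find (p ++ [':','/','/'] ++ rest) [':','/','/'] = (p.length : Int) := by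
  set s := p ++ [':','/','/'] ++ rest with hs
  have hpre : [':','/','/'] <+: s.drop p.length := by
    have : s.drop p.length = [':','/','/'] ++ rest := by
      rw [hs, List.append_assoc, List.drop_append_of_le_length (by simp),
          List.drop_length]
      simp
    rw [this]; exact List.prefix_append _ _
  have hne : PySem.Chars.find s [':','/','/'] ≠ -1 := by
    rw [PySem.Chars.find_ne_neg_one_iff]
    exact hpre.isInfix.trans (List.drop_suffix _ _).isInfix
  have hnn : 0 ≤ PySem.Chars.find s [':','/','/'] := by
    have := PySem.Chars.neg_one_le_find s [':','/','/']; omega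
  obtain ⟨hat, hmin⟩ := PySem.Chars.find_spec (s := s) (sub := [':','/','/']) hnn
  set i := (PySem.Chars.find s [':','/','/']).toNat with hi
  have hle : i ≤ p.length := by
    by_contra hgt
    exact hmin p.length (by omega) hpre
  have hieq : i = p.length := by
    rcases Nat.lt_or_ge i p.length with hlt | hge
    · exfalso
      obtain ⟨t, ht⟩ := hat
      have hcolon : s[i]? = some ':' := by
        have h0 : (s.drop i)[0]? = some ':' := by
          rw [← ht]; rfl
        rwa [List.getElem?_drop, Nat.add_zero] at h0
      have hpi : s[i]? = p[i]? := by
        rw [hs, List.append_assoc, List.getElem?_append_left hlt]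
      have : p[i]? = some ':' := by rw [← hpi, hcolon]
      exact hp (List.mem_of_getElem? this)
    · omega
  omega

-- any literal scheme head in bKnown contains no ':' (used via find_sep_eq)
lemma bKnown_no_colon (p : List Char) (hmem : p ∈ bKnown) : ':' ∉ p := by
  fin_cases hmem <;> decide

-- B on a URL of shape p ++ "://" ++ rest with p a known scheme head
lemma alt_hit (url : String) (p rest : List Char) (hcs : url.toList = p ++ [':','/','/'] ++ rest)
    (hmem : p ∈ bKnown) :
    make_async_url_py_alt url = String.ofList ("postgresql+asyncpg://".toList ++ rest) := by
  have hp : ':' ∉ p := bKnown_no_colon p hmem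
  have hfind : PySem.Chars.find url.toList "://".toList = (p.length : Int) := by
    show PySem.Chars.find url.toList [':','/','/'] = (p.length : Int)
    rw [hcs]; exact find_sep_eq p rest hp
  have htake : url.toList.take p.length = p := by
    rw [hcs, List.append_assoc]; exact List.take_left ..
  have hdrop : url.toList.drop (p.length + "://".toList.length) = rest := by
    have hlen : (p ++ [':','/','/']).length = p.length + "://".toList.length := by simp
    rw [hcs, ← hlen, List.drop_left]
  have hpart : pyPartition url.toList "://".toList = (p, "://".toList, rest) := by
    unfold pyPartition
    rw [hfind, if_neg (by intro h; omega)]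
    rw [Int.toNat_natCast, htake, hdrop]
  unfold make_async_url_py_alt
  rw [hpart]
  simp only [bCombine]
  rw [if_pos ⟨by decide, hmem⟩]

-- A's first-occurrence replace when old is a prefix of s
lemma replace1_of_prefix (s old nw : List Char) (h : old <+: s) :
    pyReplace1 s old nw = nw ++ s.drop old.length := by
  unfold pyReplace1
  rw [find_zero_of_prefix s old h]
  norm_num

-- the hit case for one replacement pair: both sides produce async ++ rest
lemma hit_case (url : String) (p : List Char) (hmem : p ∈ bKnown)
    (h : (p ++ [':','/','/']) <+: url.toList) :
    String.ofList (pyReplace1 url.toList (p ++ [':','/','/']) "postgresql+asyncpg://".toList)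
      = make_async_url_py_alt url := by
  obtain ⟨rest, hrest⟩ := h
  have hcs : url.toList = p ++ [':','/','/'] ++ rest := hrest.symm
  rw [alt_hit url p rest hcs hmem,
      replace1_of_prefix _ _ _ ⟨rest, hrest⟩, hcs, List.drop_left]

-- the miss case: if none of the four full prefixes matches, B returns url
lemma alt_miss (url : String)
    (h1 : ¬ "postgresql+psycopg2://".toList <+: url.toList)
    (h2 : ¬ "postgresql+psycopg://".toList <+: url.toList)
    (h3 : ¬ "postgresql://".toList <+: url.toList)
    (h4 : ¬ "postgres://".toList <+: url.toList) :
    make_async_url_py_alt url = url := by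
  unfold make_async_url_py_alt
  by_cases hneg : PySem.Chars.find url.toList "://".toList = -1
  · have hpart : pyPartition url.toList "://".toList = (url.toList, [], []) := by
      unfold pyPartition; rw [if_pos hneg]
    rw [hpart]; simp [bCombine]
  · have hpart : pyPartition url.toList "://".toList
        = (url.toList.take (PySem.Chars.find url.toList "://".toList).toNat, "://".toList,
           url.toList.drop ((PySem.Chars.find url.toList "://".toList).toNat + "://".toList.length)) := by
      unfold pyPartition; rw [if_neg hneg]
    rw [hpart]; simp only [bCombine]
    have hcond : ¬("://".toList ≠ ([] : List Char)
        ∧ url.toList.take (PySem.Chars.find url.toList "://".toList).toNat ∈ bKnown) := by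
      rintro ⟨-, hmem⟩
      have hnn : 0 ≤ PySem.Chars.find url.toList "://".toList := by
        have := PySem.Chars.neg_one_le_find url.toList "://".toList; omega
      obtain ⟨hat, -⟩ := PySem.Chars.find_spec (s := url.toList) (sub := "://".toList) hnn
      obtain ⟨t, ht⟩ := hat
      have hsplit : url.toList = url.toList.take (PySem.Chars.find url.toList "://".toList).toNat
          ++ "://".toList ++ t := by
        conv_lhs => rw [← List.take_append_drop (PySem.Chars.find url.toList "://".toList).toNat url.toList]
        rw [← ht, List.append_assoc]
      simp only [bKnown, List.mem_cons] at hmem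
      rcases hmem with h | h | h | h | h
      · refine h1 ⟨t, ?_⟩
        have e : "postgresql+psycopg2://".toList
            = "postgresql+psycopg2".toList ++ "://".toList := by decide
        rw [e, ← h, List.append_assoc, ← List.append_assoc, ← hsplit]
      · refine h2 ⟨t, ?_⟩
        have e : "postgresql+psycopg://".toList
            = "postgresql+psycopg".toList ++ "://".toList := by decide
        rw [e, ← h, List.append_assoc, ← List.append_assoc, ← hsplit]
      · refine h3 ⟨t, ?_⟩
        have e : "postgresql://".toList = "postgresql".toList ++ "://".toList := by decide
        rw [e, ← h, List.append_assoc, ← List.append_assoc, ← hsplit]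
      · refine h4 ⟨t, ?_⟩
        have e : "postgres://".toList = "postgres".toList ++ "://".toList := by decide
        rw [e, ← h, List.append_assoc, ← List.append_assoc, ← hsplit]
      · simp at h
    rw [if_neg hcond]

-- ===== VERDICT (by name: the statement is the Claim_ definition above) =====
theorem make_async_url_py_spec : Claim_equal_make_async_url_py := by
  intro url _
  unfold Spec_make_async_url_py make_async_url_py aReplacements
  simp only [aLoop]
  by_cases c1 : "postgresql+psycopg2://".toList <+: url.toList
  · rw [if_pos (by rw [PySem.Chars.startswith_iff]; exact c1)]
    have : "postgresql+psycopg2://".toList = "postgresql+psycopg2".toList ++ [':','/','/'] := by decide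
    rw [this] at c1 ⊢
    exact hit_case url _ (by decide) c1
  · rw [if_neg (by rw [PySem.Chars.startswith_iff]; exact c1)]
    by_cases c2 : "postgresql+psycopg://".toList <+: url.toList
    · rw [if_pos (by rw [PySem.Chars.startswith_iff]; exact c2)]
      have : "postgresql+psycopg://".toList = "postgresql+psycopg".toList ++ [':','/','/'] := by decide
      rw [this] at c2 ⊢
      exact hit_case url _ (by decide) c2
    · rw [if_neg (by rw [PySem.Chars.startswith_iff]; exact c2)]
      by_cases c3 : "postgresql://".toList <+: url.toList
      · rw [if_pos (by rw [PySem.Chars.startswith_iff]; exact c3)]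
        have : "postgresql://".toList = "postgresql".toList ++ [':','/','/'] := by decide
        rw [this] at c3 ⊢
        exact hit_case url _ (by decide) c3
      · rw [if_neg (by rw [PySem.Chars.startswith_iff]; exact c3)]
        by_cases c4 : "postgres://".toList <+: url.toList
        · rw [if_pos (by rw [PySem.Chars.startswith_iff]; exact c4)]
          have : "postgres://".toList = "postgres".toList ++ [':','/','/'] := by decide
          rw [this] at c4 ⊢
          exact hit_case url _ (by decide) c4
        · rw [if_neg (by rw [PySem.Chars.startswith_iff]; exact c4)]
          exact (alt_miss url c1 c2 c3 c4).symm
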